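-- pv_equiv track=rewrite | github.com/rizstej/IPM-22fkbICSG_2023-24 | week-05.py | encrypt_xor_with_changing_key_by_prev_cipher_longer_key
-- ===== SOURCE A (Python) =====
-- def encrypt_xor_with_changing_key_by_prev_cipher_longer_key (input, key_list, coding):
--     '''
--     >>> key_list = [0x20, 0x44, 0x54, 0x20]
--     >>> encrypt_xor_with_changing_key_by_prev_cipher_longer_key('abcdefg', key_list, 'encrypt')
--     'A&7D$@P'
--     >>> encrypt_xor_with_changing_key_by_prev_cipher_longer_key('aaabbbb', key_list, 'encrypt')
--     'A%5B#GW'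
--     >>> encrypt_xor_with_changing_key_by_prev_cipher_longer_key(
--     ...    encrypt_xor_with_changing_key_by_prev_cipher_longer_key('abcdefg',key_list,'encrypt'),
--     ...        key_list,'decrypt')
--     'abcdefg'
--     >>> encrypt_xor_with_changing_key_by_prev_cipher_longer_key(
--     ...    encrypt_xor_with_changing_key_by_prev_cipher_longer_key('Hellobello, it will work for a long message as well',key_list,'encrypt'),
--     ...        key_list,'decrypt')
--     'Hellobello, it will work for a long message as well'
--     '''
--     chars = [input[i] for i in range(len(input))]
--     chunks = []
--     part_1, part_2, part_3, part_4 = '', '', '', ''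
--
--     for i in range(len(chars)):
--       if (i % 4) == 0: part_1 += chars[i]
--       if (i % 4) == 1: part_2 += chars[i]
--       if (i % 4) == 2: part_3 += chars[i]
--       if (i % 4) == 3: part_4 += chars[i]
--
--     chunks.append(part_1), chunks.append(part_2), chunks.append(part_3), chunks.append(part_4)
--     coded_chunks = []
--     code = ''
--
--     if coding == 'encrypt':
--
--         for i in range(len(chunks)):
--             key = key_list[i]
--
--             for c in chunks[i]:
--                 code += chr(ord(c) ^ key)
--                 key = ord(c) ^ key
--
--             coded_chunks.append(code)
--             code = ''
--
--         part_1, part_2, part_3, part_4 = '', '', '', ''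
--
--         for i in range(len(coded_chunks)):
--             for j in range(len(coded_chunks[i])):
--                 if (j % 4) == 0: part_1 += coded_chunks[i][j]
--                 if (j % 4) == 1: part_2 += coded_chunks[i][j]
--                 if (j % 4) == 2: part_3 += coded_chunks[i][j]
--                 if (j % 4) == 3: part_4 += coded_chunks[i][j]
--
--         code += part_1
--         code += part_2
--         code += part_3
--         code += part_4
--
--     if coding == 'decrypt':
--
--         for i in range(len(chunks)):
--             key = key_list[i]
--
--             for j in range(len(chunks[i])):
--                 code += chr(ord(chunks[i][j]) ^ key)
--                 key = ord(code[j]) ^ key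
--
--             coded_chunks.append(code)
--             code = ''
--
--         part_1, part_2, part_3, part_4 = '', '', '', ''
--
--         for i in range(len(coded_chunks)):
--             for j in range(len(coded_chunks[i])):
--                 if (j % 4) == 0: part_1 += coded_chunks[i][j]
--                 if (j % 4) == 1: part_2 += coded_chunks[i][j]
--                 if (j % 4) == 2: part_3 += coded_chunks[i][j]
--                 if (j % 4) == 3: part_4 += coded_chunks[i][j]
--
--         code += part_1
--         code += part_2
--         code += part_3
--         code += part_4
--
--     return code
-- ===== SOURCE B (Python) =====
-- def encrypt_xor_with_changing_key_by_prev_cipher_longer_key(input, key_list, coding):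
--     if coding not in ('encrypt', 'decrypt'):
--         return ''
--     encrypting = coding == 'encrypt'
--
--     def every4(s):
--         # the characters of s at positions 0, 4, 8, ...
--         out = ''
--         while s:
--             out += s[0]
--             s = s[4:]
--         return out
--
--     def code_chunk(chunk, key):
--         out = ''
--         for ch in chunk:
--             x = ord(ch)
--             y = x ^ key
--             out += chr(y)
--             # the chained key is always the previous ciphertext byte
--             key = y if encrypting else x
--         return out
--
--     coded = [code_chunk(every4(input[r:]), key_list[r]) for r in range(4)]
--     return ''.join(every4(c[q:]) for q in range(4) for c in coded)
-- ===== Notes on version B (the rewrite author's own statement) =====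
-- stated objective: simpler
-- what changed: B replaces A's four duplicated loop blocks (index-distribute into 4 parts, separate encrypt and decrypt chained loops, re-distribute) by one unified coder whose chained key is simply the previous ciphertext byte (y for encrypt, the input byte x for decrypt), applied to skip-4 extractions of the input, then re-interleaved; dropping the char-list build and the two 4-way distribution passes also makes it measurably faster by a constant factor.
import Mathlib
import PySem

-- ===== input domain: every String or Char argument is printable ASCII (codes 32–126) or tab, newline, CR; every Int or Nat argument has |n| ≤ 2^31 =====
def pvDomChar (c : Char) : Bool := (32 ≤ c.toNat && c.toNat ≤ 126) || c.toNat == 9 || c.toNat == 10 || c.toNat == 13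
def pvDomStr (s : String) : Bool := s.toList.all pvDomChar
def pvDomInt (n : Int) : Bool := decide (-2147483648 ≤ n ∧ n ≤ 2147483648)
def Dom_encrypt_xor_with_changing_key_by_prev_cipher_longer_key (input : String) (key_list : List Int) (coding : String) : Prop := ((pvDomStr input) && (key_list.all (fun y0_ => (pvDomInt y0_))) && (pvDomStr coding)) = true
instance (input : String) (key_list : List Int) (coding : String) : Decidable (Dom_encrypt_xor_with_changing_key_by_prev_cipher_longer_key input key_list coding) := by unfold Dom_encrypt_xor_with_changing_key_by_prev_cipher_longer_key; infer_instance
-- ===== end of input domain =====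

-- B replaces A's four duplicated distribute/encode/re-distribute loop blocks by one unified coder
-- (the chained key is the previous ciphertext byte) applied to skip-4 extractions: simpler, and the
-- timing run measured it faster by a constant factor.

-- ord(c) (exact: Lean Char.toNat is the Unicode code point)
def pyOrd (c : Char) : Int := (c.toNat : Int)
-- chr(n) (exact for n a valid, non-surrogate code point — Pre_ guarantees this; junk elsewhere)
def pyChr (n : Int) : Char := Char.ofNat n.toNat

-- ===== PORT A =====
-- the four independent 'if (i % 4) == k: part_k += …' branches of A's distribution loops
def pvDistStep (st : List Char × List Char × List Char × List Char) (ic : Int × Char) :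
    List Char × List Char × List Char × List Char :=
  let p1 := if PySem.Int.mod ic.1 4 = 0 then st.1 ++ [ic.2] else st.1
  let p2 := if PySem.Int.mod ic.1 4 = 1 then st.2.1 ++ [ic.2] else st.2.1
  let p3 := if PySem.Int.mod ic.1 4 = 2 then st.2.2.1 ++ [ic.2] else st.2.2.1
  let p4 := if PySem.Int.mod ic.1 4 = 3 then st.2.2.2 ++ [ic.2] else st.2.2.2
  (p1, p2, p3, p4)

-- encrypt inner loop body: code += chr(ord(c) ^ key); key = ord(c) ^ key
def pvEncStep (st : List Char × Int) (c : Char) : List Char × Int :=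
  (st.1 ++ [pyChr (PySem.Int.bxor (pyOrd c) st.2)], PySem.Int.bxor (pyOrd c) st.2)

-- decrypt inner loop body: code += chr(ord(chunk[j]) ^ key); key = ord(code[j]) ^ key
def pvDecStep (st : List Char × Int) (jc : Int × Char) : List Char × Int :=
  let code := st.1 ++ [pyChr (PySem.Int.bxor (pyOrd jc.2) st.2)]
  (code, PySem.Int.bxor (pyOrd (PySem.List.pyGetD code jc.1 (Char.ofNat 0))) st.2)

def encrypt_xor_with_changing_key_by_prev_cipher_longer_key (input : String) (key_list : List Int) (coding : String) : String :=
  let chars := (PySem.List.pyRange 0 (PySem.List.len input.toList)).map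
      (fun i => PySem.List.pyGetD input.toList i (Char.ofNat 0))
  let st := (PySem.List.enumerate chars 0).foldl pvDistStep ([], [], [], [])
  let chunks : List (List Char) := [st.1, st.2.1, st.2.2.1, st.2.2.2]
  if coding = "encrypt" then
    let coded := (PySem.List.pyRange 0 (PySem.List.len chunks)).foldl (fun acc i =>
      let key := PySem.List.pyGetD key_list i 0
      let r := (PySem.List.pyGetD chunks i []).foldl pvEncStep ([], key)
      acc ++ [r.1]) []
    let p := coded.foldl (fun st ck => (PySem.List.enumerate ck 0).foldl pvDistStep st) ([], [], [], [])
    String.ofList (p.1 ++ p.2.1 ++ p.2.2.1 ++ p.2.2.2)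
  else if coding = "decrypt" then
    let coded := (PySem.List.pyRange 0 (PySem.List.len chunks)).foldl (fun acc i =>
      let key := PySem.List.pyGetD key_list i 0
      let r := (PySem.List.enumerate (PySem.List.pyGetD chunks i []) 0).foldl pvDecStep ([], key)
      acc ++ [r.1]) []
    let p := coded.foldl (fun st ck => (PySem.List.enumerate ck 0).foldl pvDistStep st) ([], [], [], [])
    String.ofList (p.1 ++ p.2.1 ++ p.2.2.1 ++ p.2.2.2)
  else ""

-- ===== PORT B =====
-- every4: while s: out += s[0]; s = s[4:]
def altEvery4 : List Char → List Char
  | [] => []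
  | c :: t => c :: altEvery4 (PySem.List.slice (c :: t) (some 4) none)
  termination_by s => s.length
  decreasing_by
    rw [PySem.List.slice_from _ (by norm_num)]
    simp

-- code_chunk loop body: y = x ^ key; out += chr(y); key = y if encrypting else x
def altCodeStep (enc : Bool) (st : List Char × Int) (c : Char) : List Char × Int :=
  let x := pyOrd c
  let y := PySem.Int.bxor x st.2
  (st.1 ++ [pyChr y], if enc then y else x)

def altCodeChunk (enc : Bool) (chunk : List Char) (key : Int) : List Char :=
  (chunk.foldl (altCodeStep enc) ([], key)).1

def encrypt_xor_with_changing_key_by_prev_cipher_longer_key_alt (input : String) (key_list : List Int) (coding : String) : String :=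
  if coding = "encrypt" ∨ coding = "decrypt" then
    let enc := coding = "encrypt"
    let coded := (PySem.List.pyRange 0 4).map (fun r =>
      altCodeChunk enc (altEvery4 (PySem.List.slice input.toList (some r) none))
        (PySem.List.pyGetD key_list r 0))
    String.ofList (((PySem.List.pyRange 0 4).map (fun q =>
      (coded.map (fun ck => altEvery4 (PySem.List.slice ck (some q) none))).flatten)).flatten)
  else ""

-- ===== PRECONDITION & SPEC =====
-- Pre_ excludes inputs where A raises (fewer than 4 keys with coding 'encrypt'/'decrypt' → IndexError;
-- a used key negative or ≥ 0x110000 → chr ValueError) and inputs where A returns a string containing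
-- lone UTF-16 surrogates (a used key whose 128-aligned block lies in 0xD800–0xDFFF), which is not a
-- value representable as a Lean String. A key i is 'used' iff chunk i is nonempty, i.e. i < len(input).
def Pre_encrypt_xor_with_changing_key_by_prev_cipher_longer_key (input : String) (key_list : List Int) (coding : String) : Prop :=
  (coding = "encrypt" ∨ coding = "decrypt") →
    (4 ≤ key_list.length ∧ ∀ i : Nat, i < 4 → i < input.toList.length →
      0 ≤ key_list.getD i 0 ∧
        (key_list.getD i 0 < 55296 ∨ (57344 ≤ key_list.getD i 0 ∧ key_list.getD i 0 < 1114112)))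
instance (input : String) (key_list : List Int) (coding : String) : Decidable (Pre_encrypt_xor_with_changing_key_by_prev_cipher_longer_key input key_list coding) := by unfold Pre_encrypt_xor_with_changing_key_by_prev_cipher_longer_key; infer_instance

def pvWitness_encrypt_xor_with_changing_key_by_prev_cipher_longer_key : String × List Int × String :=
  ("abcdefg", [32, 68, 84, 32], "encrypt")

def Spec_encrypt_xor_with_changing_key_by_prev_cipher_longer_key (input : String) (key_list : List Int) (coding : String) (out : String) : Prop := out = encrypt_xor_with_changing_key_by_prev_cipher_longer_key_alt input key_list coding
instance (input : String) (key_list : List Int) (coding : String) (out : String) : Decidable (Spec_encrypt_xor_with_changing_key_by_prev_cipher_longer_key input key_list coding out) := by unfold Spec_encrypt_xor_with_changing_key_by_prev_cipher_longer_key; infer_instance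

-- ===== CLAIM (what is proved, stated in full; the proofs are below) =====
def Claim_equal_encrypt_xor_with_changing_key_by_prev_cipher_longer_key : Prop := ∀ (input : String) (key_list : List Int) (coding : String), Dom_encrypt_xor_with_changing_key_by_prev_cipher_longer_key input key_list coding → Pre_encrypt_xor_with_changing_key_by_prev_cipher_longer_key input key_list coding → Spec_encrypt_xor_with_changing_key_by_prev_cipher_longer_key input key_list coding (encrypt_xor_with_changing_key_by_prev_cipher_longer_key input key_list coding)

-- ===== LEMMAS AND PROOFS =====

-- pvSel k l: the characters of l at positions p with (p - (4 - k)) % 4 = 0 — i.e. skip k, then every 4th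
def pvSel : Nat → List Char → List Char
  | _, [] => []
  | 0, c :: t => c :: pvSel 3 t
  | k + 1, _ :: t => pvSel k t

theorem altEvery4_cons (c : Char) (t : List Char) :
    altEvery4 (c :: t) = c :: altEvery4 (t.drop 3) := by
  rw [altEvery4, PySem.List.slice_from _ (by norm_num)]
  rfl

theorem altEvery4_drop_eq_pvSel : ∀ (t : List Char) (k : Nat), altEvery4 (t.drop k) = pvSel k t := by
  intro t
  induction t with
  | nil => intro k; simp [altEvery4, pvSel]
  | cons a t ih =>
    intro k
    match k with
    | 0 => rw [List.drop_zero, altEvery4_cons, pvSel, ← ih 3]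
    | k + 1 => rw [List.drop_succ_cons, pvSel, ih k]

theorem pvSel_nil_of_le : ∀ (t : List Char) (k : Nat), t.length ≤ k → pvSel k t = [] := by
  intro t
  induction t with
  | nil => intro k _; cases k <;> rfl
  | cons a t ih =>
    intro k hk
    match k with
    | k + 1 => exact ih k (by simpa using hk)

theorem pvSel_subset : ∀ (t : List Char) (k : Nat) (c : Char), c ∈ pvSel k t → c ∈ t := by
  intro t
  induction t with
  | nil => intro k c h; simp [pvSel] at h
  | cons a t ih =>
    intro k c h
    match k with
    | 0 =>
      rw [pvSel] at h
      rcases List.mem_cons.mp h with h | h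
      · simp [h]
      · exact List.mem_cons_of_mem _ (ih 3 c h)
    | k + 1 => exact List.mem_cons_of_mem _ (ih k c h)

-- the distribution loop: part j collects exactly pvSel ((j + 4 - s % 4) % 4) of the remaining list
theorem dist_lemma : ∀ (l : List Char) (s : Nat) (p1 p2 p3 p4 : List Char),
    (PySem.List.enumerate l (s : Int)).foldl pvDistStep (p1, p2, p3, p4) =
      (p1 ++ pvSel ((0 + 4 - s % 4) % 4) l, p2 ++ pvSel ((1 + 4 - s % 4) % 4) l,
       p3 ++ pvSel ((2 + 4 - s % 4) % 4) l, p4 ++ pvSel ((3 + 4 - s % 4) % 4) l) := by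
  intro l
  induction l with
  | nil => intro s p1 p2 p3 p4; simp [PySem.List.enumerate, pvSel]
  | cons c t ih =>
    intro s p1 p2 p3 p4
    rw [PySem.List.enumerate_cons, List.foldl_cons]
    have hmod : PySem.Int.mod (s : Int) 4 = ((s % 4 : Nat) : Int) := by
      exact_mod_cast PySem.Int.mod_natCast s 4
    have hs1 : ((s : Int) + 1) = ((s + 1 : Nat) : Int) := by push_cast; ring
    have h4 : s % 4 = 0 ∨ s % 4 = 1 ∨ s % 4 = 2 ∨ s % 4 = 3 := by omega
    have hstep : ∀ a b c' d, pvDistStep (a, b, c', d) ((s : Int), c) =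
        (if s % 4 = 0 then a ++ [c] else a, if s % 4 = 1 then b ++ [c] else b,
         if s % 4 = 2 then c' ++ [c] else c', if s % 4 = 3 then d ++ [c] else d) := by
      intro a b c' d
      simp only [pvDistStep, hmod]
      rcases h4 with h | h | h | h <;> simp [h]
    rw [hstep, hs1, ih]
    rcases h4 with h | h | h | h <;>
      simp [h, Nat.add_mod, pvSel, List.append_assoc]


-- the fold with the alt coder step splits off its accumulator
theorem altFold_append (e : Bool) : ∀ (l : List Char) (st : List Char × Int),
    l.foldl (altCodeStep e) st =
      (st.1 ++ (l.foldl (altCodeStep e) ([], st.2)).1, (l.foldl (altCodeStep e) ([], st.2)).2) := by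
  intro l
  induction l with
  | nil => intro st; simp
  | cons c t ih =>
    intro st
    rw [List.foldl_cons, List.foldl_cons, ih (altCodeStep e st c),
      ih (altCodeStep e ([], st.2) c)]
    simp [altCodeStep]

theorem encStep_eq : pvEncStep = altCodeStep true := by
  funext st c
  simp [pvEncStep, altCodeStep]

theorem xor_valid (x k : Nat) (hx : x < 128) (hk : k.isValidChar) : (x ^^^ k).isValidChar := by
  have h7 : (x ^^^ k) >>> 7 = x >>> 7 ^^^ k >>> 7 := Nat.shiftRight_xor_distrib
  have hx7 : x >>> 7 = 0 := by simp [Nat.shiftRight_eq_div_pow]; omega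
  rw [hx7, Nat.zero_xor] at h7
  have hq : (x ^^^ k) / 128 = k / 128 := by
    simpa [Nat.shiftRight_eq_div_pow] using h7
  have h1 := Nat.div_add_mod (x ^^^ k) 128
  have h2 := Nat.div_add_mod k 128
  have h3 : (x ^^^ k) % 128 < 128 := Nat.mod_lt _ (by norm_num)
  have h4 : k % 128 < 128 := Nat.mod_lt _ (by norm_num)
  simp only [Nat.isValidChar] at hk ⊢
  omega

theorem toNat_pyChr (n : Nat) (h : n.isValidChar) : (pyChr (n : Int)).toNat = n := by
  simp only [pyChr, Int.toNat_natCast]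
  rw [Char.ofNat, dif_pos h]
  exact Char.toNat_ofNatAux h

-- A's decrypt loop = B's coder: the re-read ciphertext byte code[j] is chr(ord(chunk[j]) ^ key),
-- so the chained key equals ord(chunk[j])
theorem dec_eq : ∀ (l : List Char) (code : List Char) (k : Nat),
    k.isValidChar → (∀ c ∈ l, c.toNat < 128) →
    (PySem.List.enumerate l (code.length : Int)).foldl pvDecStep (code, (k : Int)) =
      (code ++ (l.foldl (altCodeStep false) ([], (k : Int))).1,
       (l.foldl (altCodeStep false) ([], (k : Int))).2) := by
  intro l
  induction l with
  | nil => intro code k _ _; simp [PySem.List.enumerate]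
  | cons c t ih =>
    intro code k hk hc
    have hx : c.toNat < 128 := hc c (List.mem_cons_self ..)
    rw [PySem.List.enumerate_cons, List.foldl_cons]
    have hstep : pvDecStep (code, (k : Int)) ((code.length : Int), c) =
        (code ++ [pyChr ((c.toNat ^^^ k : Nat) : Int)], ((c.toNat : Nat) : Int)) := by
      simp only [pvDecStep, pyOrd]
      rw [PySem.Int.bxor_natCast]
      have hget : PySem.List.pyGetD (code ++ [pyChr ((c.toNat ^^^ k : Nat) : Int)])
          ((code.length : Int)) (Char.ofNat 0) = pyChr ((c.toNat ^^^ k : Nat) : Int) := by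
        rw [PySem.List.pyGetD_natCast]
        simp [List.getD]
      rw [hget]
      rw [toNat_pyChr _ (xor_valid _ _ hx hk), PySem.Int.bxor_natCast,
        Nat.xor_xor_cancel_right]
    rw [hstep]
    have hlen : ((code.length : Int) + 1) = (((code ++ [pyChr ((c.toNat ^^^ k : Nat) : Int)]).length : Nat) : Int) := by
      simp
    rw [hlen, ih _ c.toNat (Or.inl (by omega)) (fun d hd => hc d (List.mem_cons_of_mem _ hd))]
    have hrhs : (c :: t).foldl (altCodeStep false) ([], (k : Int)) =
        ([pyChr ((c.toNat ^^^ k : Nat) : Int)] ++ (t.foldl (altCodeStep false) ([], ((c.toNat : Nat) : Int))).1,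
         (t.foldl (altCodeStep false) ([], ((c.toNat : Nat) : Int))).2) := by
      rw [List.foldl_cons]
      have : altCodeStep false ([], (k : Int)) c = ([pyChr ((c.toNat ^^^ k : Nat) : Int)], ((c.toNat : Nat) : Int)) := by
        simp [altCodeStep, pyOrd, PySem.Int.bxor_natCast]
      rw [this, altFold_append]
    rw [hrhs]
    simp

theorem distFold_zero (l : List Char) (p1 p2 p3 p4 : List Char) :
    (PySem.List.enumerate l 0).foldl pvDistStep (p1, p2, p3, p4) =
      (p1 ++ pvSel 0 l, p2 ++ pvSel 1 l, p3 ++ pvSel 2 l, p4 ++ pvSel 3 l) := by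
  have h := dist_lemma l 0 p1 p2 p3 p4
  simpa using h

theorem dist_outer : ∀ (cs : List (List Char)) (p1 p2 p3 p4 : List Char),
    cs.foldl (fun st ck => (PySem.List.enumerate ck 0).foldl pvDistStep st) (p1, p2, p3, p4) =
      (p1 ++ (cs.map (pvSel 0)).flatten, p2 ++ (cs.map (pvSel 1)).flatten,
       p3 ++ (cs.map (pvSel 2)).flatten, p4 ++ (cs.map (pvSel 3)).flatten) := by
  intro cs
  induction cs with
  | nil => intro p1 p2 p3 p4; simp
  | cons ck cs ih =>
    intro p1 p2 p3 p4
    rw [List.foldl_cons, distFold_zero, ih]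
    simp

theorem dec_chunk_eq (ch : List Char) (key : Int)
    (h : ch = [] ∨ (0 ≤ key ∧ key.toNat.isValidChar)) (hc : ∀ c ∈ ch, c.toNat < 128) :
    ((PySem.List.enumerate ch 0).foldl pvDecStep ([], key)).1 = altCodeChunk false ch key := by
  rcases h with h | ⟨h0, hv⟩
  · subst h; rfl
  · have hkey : key = ((key.toNat : Nat) : Int) := (Int.toNat_of_nonneg h0).symm
    rw [hkey]
    have h := dec_eq ch [] key.toNat hv hc
    simp only [List.length_nil, Nat.cast_zero] at h
    rw [h]
    simp [altCodeChunk]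

-- per-index coded-chunk equality for the decrypt branch
theorem dec_chunk_of_pre (chars : List Char) (key : Int) (i : Nat)
    (hkey : i < chars.length → 0 ≤ key ∧ key.toNat.isValidChar)
    (hsmall : ∀ c ∈ chars, c.toNat < 128) :
    ((PySem.List.enumerate (pvSel i chars) 0).foldl pvDecStep ([], key)).1 =
      altCodeChunk false (pvSel i chars) key := by
  apply dec_chunk_eq
  · by_cases h : i < chars.length
    · exact Or.inr (hkey h)
    · exact Or.inl (pvSel_nil_of_le chars i (by omega))
  · exact fun c hc => hsmall c (pvSel_subset chars i c hc)

-- ===== VERDICT (by name: the statement is the Claim_ definition above) =====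
theorem encrypt_xor_with_changing_key_by_prev_cipher_longer_key_spec : Claim_equal_encrypt_xor_with_changing_key_by_prev_cipher_longer_key := by
  intro input key_list coding hDom hPre
  unfold Spec_encrypt_xor_with_changing_key_by_prev_cipher_longer_key
  have hchars : (PySem.List.pyRange 0 (PySem.List.len input.toList)).map
      (fun i => PySem.List.pyGetD input.toList i (Char.ofNat 0)) = input.toList :=
    PySem.List.map_pyGetD_pyRange_zero _ _
  have hsmall : ∀ c ∈ input.toList, c.toNat < 128 := by
    intro c hc
    unfold Dom_encrypt_xor_with_changing_key_by_prev_cipher_longer_key at hDom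
    simp only [Bool.and_eq_true, pvDomStr, List.all_eq_true] at hDom
    have := hDom.1.1 c hc
    simp only [pvDomChar] at this
    simp only [Bool.or_eq_true, Bool.and_eq_true, decide_eq_true_eq, beq_iff_eq] at this
    omega
  have hsel : ∀ (ck : List Char) (k : Nat), altEvery4 (PySem.List.slice ck (some (k : Int)) none) = pvSel k ck := by
    intro ck k
    rw [PySem.List.slice_from _ (by positivity), Int.toNat_natCast]
    exact altEvery4_drop_eq_pvSel _ _
  have hsel4 : ∀ ck : List Char, altEvery4 (PySem.List.slice ck (some 0) none) = pvSel 0 ck ∧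
      altEvery4 (PySem.List.slice ck (some 1) none) = pvSel 1 ck ∧
      altEvery4 (PySem.List.slice ck (some 2) none) = pvSel 2 ck ∧
      altEvery4 (PySem.List.slice ck (some 3) none) = pvSel 3 ck := by
    intro ck
    refine ⟨?_, ?_, ?_, ?_⟩
    · simpa using hsel ck 0
    · simpa using hsel ck 1
    · simpa using hsel ck 2
    · simpa using hsel ck 3
  by_cases hE : coding = "encrypt"
  · obtain ⟨hlen, hkeys⟩ := hPre (Or.inl hE)
    subst hE
    unfold encrypt_xor_with_changing_key_by_prev_cipher_longer_key
      encrypt_xor_with_changing_key_by_prev_cipher_longer_key_alt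
    simp only [hchars, distFold_zero, List.nil_append, encStep_eq]
    simp only [if_true]
    have hrange4 : PySem.List.pyRange 0 (PySem.List.len
        ([pvSel 0 input.toList, pvSel 1 input.toList, pvSel 2 input.toList, pvSel 3 input.toList] : List (List Char))) = [0, 1, 2, 3] := by
      simp [PySem.List.len]
      decide
    rw [hrange4]
    simp only [List.foldl_cons, List.foldl_nil, List.nil_append,
      PySem.List.pyGetD_ofNat', List.getD_cons_zero, List.getD_cons_succ,
      show PySem.List.pyRange 0 4 = [0, 1, 2, 3] from by decide, List.map_cons, List.map_nil,
      hsel4, dist_outer, List.flatten]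
    refine congrArg String.ofList ?_
    simp [altCodeChunk, List.append_assoc]
  · by_cases hD : coding = "decrypt"
    · obtain ⟨hlen, hkeys⟩ := hPre (Or.inr hD)
      subst hD
      have hkv : ∀ i : Nat, i < 4 → i < input.toList.length →
          0 ≤ PySem.List.pyGetD key_list (OfNat.ofNat i : Int) 0 ∧
            (PySem.List.pyGetD key_list (OfNat.ofNat i : Int) 0).toNat.isValidChar := by
        intro i h1 h2
        rw [PySem.List.pyGetD_ofNat']
        obtain ⟨ha, hb⟩ := hkeys i h1 h2
        refine ⟨ha, ?_⟩
        simp only [Nat.isValidChar]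
        omega
      have hd0 := dec_chunk_of_pre input.toList (PySem.List.pyGetD key_list 0 0) 0
        (fun h => hkv 0 (by omega) h) hsmall
      have hd1 := dec_chunk_of_pre input.toList (PySem.List.pyGetD key_list 1 0) 1
        (fun h => hkv 1 (by omega) h) hsmall
      have hd2 := dec_chunk_of_pre input.toList (PySem.List.pyGetD key_list 2 0) 2
        (fun h => hkv 2 (by omega) h) hsmall
      have hd3 := dec_chunk_of_pre input.toList (PySem.List.pyGetD key_list 3 0) 3
        (fun h => hkv 3 (by omega) h) hsmall
      unfold encrypt_xor_with_changing_key_by_prev_cipher_longer_key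
        encrypt_xor_with_changing_key_by_prev_cipher_longer_key_alt
      simp only [hchars, distFold_zero, List.nil_append]
      simp only [if_true]
      have hrange4 : PySem.List.pyRange 0 (PySem.List.len
          ([pvSel 0 input.toList, pvSel 1 input.toList, pvSel 2 input.toList, pvSel 3 input.toList] : List (List Char))) = [0, 1, 2, 3] := by
        simp [PySem.List.len]
        decide
      rw [hrange4]
      simp only [List.foldl_cons, List.foldl_nil, List.nil_append,
        PySem.List.pyGetD_ofNat', List.getD_cons_zero, List.getD_cons_succ,
        show PySem.List.pyRange 0 4 = [0, 1, 2, 3] from by decide, List.map_cons, List.map_nil,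
        hsel4, dist_outer, List.flatten]
      simp only [PySem.List.pyGetD_ofNat', List.getD] at hd0 hd1 hd2 hd3
      refine congrArg String.ofList ?_
      simp [hd0, hd1, hd2, hd3, List.append_assoc]
    · unfold encrypt_xor_with_changing_key_by_prev_cipher_longer_key
        encrypt_xor_with_changing_key_by_prev_cipher_longer_key_alt
      simp [hE, hD]
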